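-- pv_equiv track=rewrite | github.com/Yogioo/KeyboardClicker | src/utils/fast_visual_recognizer.py | _are_similar_types
-- ===== SOURCE A (Python) =====
-- def _are_similar_types(type1: str, type2: str) -> bool:
--     """判断两个类型是否相似，可以合并"""
--     # 定义可以合并的相似类型组
--     similar_groups = [
--         {'button', 'icon'},  # 按钮和图标可以合并
--         {'link', 'text'},    # 链接和文字可以合并
--     ]
--
--     for group in similar_groups:
--         if type1 in group and type2 in group:
--             return True
--     return False
-- ===== SOURCE B (Python) =====
-- # The similarity relation, materialized extensionally as ordered pairs.
-- _SIMILAR_PAIRS = {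
--     ('button', 'button'), ('button', 'icon'), ('icon', 'button'), ('icon', 'icon'),
--     ('link', 'link'), ('link', 'text'), ('text', 'link'), ('text', 'text'),
-- }
--
-- def _are_similar_types(type1: str, type2: str) -> bool:
--     return (type1, type2) in _SIMILAR_PAIRS
-- ===== Notes on version B (the rewrite author's own statement) =====
-- stated objective: alternative
-- what changed: B materializes the whole similarity relation extensionally as one set of ordered string pairs and answers with a single pair-membership test, instead of A's scan over group sets testing each string's membership per group.
import Mathlib
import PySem

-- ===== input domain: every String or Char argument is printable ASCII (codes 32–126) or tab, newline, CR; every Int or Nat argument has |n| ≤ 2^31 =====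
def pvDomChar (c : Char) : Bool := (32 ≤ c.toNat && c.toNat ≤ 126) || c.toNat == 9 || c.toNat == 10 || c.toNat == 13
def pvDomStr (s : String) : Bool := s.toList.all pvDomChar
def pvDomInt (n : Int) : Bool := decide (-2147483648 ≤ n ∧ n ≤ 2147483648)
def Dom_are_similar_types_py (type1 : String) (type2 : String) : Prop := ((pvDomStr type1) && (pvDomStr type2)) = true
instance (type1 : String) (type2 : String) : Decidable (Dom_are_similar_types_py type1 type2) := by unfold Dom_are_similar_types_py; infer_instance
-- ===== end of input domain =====

-- B materializes the similarity relation as one explicit set of ordered string pairs and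
-- answers with a single pair-membership test (alternative structure; no group scan).

-- ===== PORT A =====
-- the literal similar_groups list of A
def pvSimilarGroups : List (PySem.Set String) :=
  [PySem.Set.ofList ["button", "icon"], PySem.Set.ofList ["link", "text"]]

-- the 'for group in similar_groups: if … return True' loop, as structural recursion
def pvGroupLoop (type1 type2 : String) : List (PySem.Set String) → Bool
  | [] => false
  | g :: rest =>
      if PySem.Set.contains g type1 && PySem.Set.contains g type2 then true
      else pvGroupLoop type1 type2 rest

def are_similar_types_py (type1 : String) (type2 : String) : Bool :=
  pvGroupLoop type1 type2 pvSimilarGroups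

-- ===== PORT B =====
-- the literal _SIMILAR_PAIRS set of Source B
def pvSimilarPairs : PySem.Set (String × String) :=
  PySem.Set.ofList
    [("button", "button"), ("button", "icon"), ("icon", "button"), ("icon", "icon"),
     ("link", "link"), ("link", "text"), ("text", "link"), ("text", "text")]

def are_similar_types_py_alt (type1 : String) (type2 : String) : Bool :=
  PySem.Set.contains pvSimilarPairs (type1, type2)

-- ===== PRECONDITION & SPEC =====
def Spec_are_similar_types_py (type1 : String) (type2 : String) (out : Bool) : Prop := out = are_similar_types_py_alt type1 type2
instance (type1 : String) (type2 : String) (out : Bool) : Decidable (Spec_are_similar_types_py type1 type2 out) := by unfold Spec_are_similar_types_py; infer_instance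

-- ===== CLAIM (what is proved, stated in full; the proofs are below) =====
def Claim_equal_are_similar_types_py : Prop := ∀ (type1 : String) (type2 : String), Dom_are_similar_types_py type1 type2 → Spec_are_similar_types_py type1 type2 (are_similar_types_py type1 type2)

-- ===== LEMMAS AND PROOFS =====

theorem pv_equal (type1 type2 : String) :
    are_similar_types_py type1 type2 = are_similar_types_py_alt type1 type2 := by
  simp only [are_similar_types_py, are_similar_types_py_alt, pvGroupLoop,
    pvSimilarGroups, pvSimilarPairs, PySem.Set.contains, PySem.Set.ofList]
  by_cases h1 : type1 = "button" <;> by_cases h2 : type1 = "icon" <;>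
    by_cases h3 : type1 = "link" <;> by_cases h4 : type1 = "text" <;>
    by_cases k1 : type2 = "button" <;> by_cases k2 : type2 = "icon" <;>
    by_cases k3 : type2 = "link" <;> by_cases k4 : type2 = "text" <;>
    simp_all

-- ===== VERDICT (by name: the statement is the Claim_ definition above) =====
theorem are_similar_types_py_spec : Claim_equal_are_similar_types_py := by
  intro type1 type2 _
  exact pv_equal type1 type2
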